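-- pv_equiv track=rewrite | github.com/gerrity95/movie_app_backend | base/recc_calculator.py | assign_director_weight
-- ===== SOURCE A (Python) =====
-- def assign_director_weight(media_weights, discovered_data, directors):
--     '''
--     Function that will identify the users most frequently rated director and append this to the movie weight.
--     '''
--     for movie in discovered_data:
--         # Not all movies will have the director populated
--         if 'director' in movie:
--             dir_id = movie['director']
--             movie_id = movie['id']
--             for dirs in directors:
--                 if dir_id == dirs[0]:
--                     media_weights[movie_id] += dirs[1]
--
--     return media_weights
-- ===== SOURCE B (Python) =====
-- def assign_director_weight(media_weights, discovered_data, directors):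
--     '''
--     Same result as A: add the weight of every matching directors entry to the
--     movie's weight; but index movies by director once, then iterate the
--     directors list as the outer loop (media_weights is updated in place, as in A).
--     '''
--     pairs = [(movie['director'], movie['id'])
--              for movie in discovered_data if 'director' in movie]
--     index = {}
--     for dir_id, movie_id in pairs:
--         index[dir_id] = index.get(dir_id, []) + [movie_id]
--     for dir_id, weight in directors:
--         for movie_id in index.get(dir_id, []):
--             media_weights[movie_id] += weight
--     return media_weights
-- ===== Notes on version B (the rewrite author's own statement) =====
-- stated objective: alternative
-- what changed: B inverts the loop nesting: one pass over discovered_data builds a director-id -> movie-ids index, then the directors list is traversed once as the outer loop, adding each entry's weight to its bucket of movies, instead of rescanning the whole directors list for every movie.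
import Mathlib
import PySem

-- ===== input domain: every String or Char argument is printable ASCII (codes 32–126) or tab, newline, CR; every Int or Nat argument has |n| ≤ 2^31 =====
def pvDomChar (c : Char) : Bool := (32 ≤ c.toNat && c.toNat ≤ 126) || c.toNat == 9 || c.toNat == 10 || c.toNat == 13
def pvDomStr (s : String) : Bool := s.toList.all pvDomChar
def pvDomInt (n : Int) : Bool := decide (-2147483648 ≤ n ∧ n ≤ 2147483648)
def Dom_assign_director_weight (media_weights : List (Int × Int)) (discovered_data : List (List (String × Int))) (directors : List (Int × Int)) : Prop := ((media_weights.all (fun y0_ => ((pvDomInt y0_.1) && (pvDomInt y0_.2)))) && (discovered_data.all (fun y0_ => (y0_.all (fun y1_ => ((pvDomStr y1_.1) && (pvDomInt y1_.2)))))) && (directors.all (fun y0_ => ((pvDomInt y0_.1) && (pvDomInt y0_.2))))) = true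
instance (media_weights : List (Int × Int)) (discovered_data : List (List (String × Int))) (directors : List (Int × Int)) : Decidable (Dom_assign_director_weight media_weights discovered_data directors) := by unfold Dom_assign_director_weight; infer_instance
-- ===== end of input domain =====

-- B builds a director->movie-ids index once and iterates directors as the outer loop; A and B both
-- mutate the Python dict media_weights in place — the equivalence proved here is about the returned value.

-- ===== PORT A =====
def assign_director_weight (media_weights : List (Int × Int)) (discovered_data : List (List (String × Int))) (directors : List (Int × Int)) : List (Int × Int) :=
  (discovered_data.foldl (fun d movie =>
      let m : PySem.Dict String Int := PySem.Dict.mk movie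
      if m.contains "director" then
        let dir_id := m.getD "director" 0
        let movie_id := m.getD "id" 0
        directors.foldl (fun d2 p => if dir_id == p.1 then d2.modify movie_id 0 (· + p.2) else d2) d
      else d) (PySem.Dict.mk media_weights)).items

-- ===== PORT B =====
def assign_director_weight_alt (media_weights : List (Int × Int)) (discovered_data : List (List (String × Int))) (directors : List (Int × Int)) : List (Int × Int) :=
  let pairs : List (Int × Int) := discovered_data.filterMap (fun movie =>
      let m : PySem.Dict String Int := PySem.Dict.mk movie
      if m.contains "director" then some (m.getD "director" 0, m.getD "id" 0) else none)
  let index : PySem.Dict Int (List Int) :=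
    pairs.foldl (fun ix pr => ix.modify pr.1 [] (· ++ [pr.2])) PySem.Dict.empty
  (directors.foldl (fun d p =>
      (index.getD p.1 []).foldl (fun d2 movie_id => d2.modify movie_id 0 (· + p.2)) d)
    (PySem.Dict.mk media_weights)).items

-- ===== PRECONDITION & SPEC =====
-- Pre_ excludes exactly the inputs where A raises KeyError: a movie with a 'director' key but no 'id' key,
-- or a matched movie whose id is not a key of media_weights; the Nodup conjunct only states the invariant of
-- the association-list image of a Python dict (a real dict has no duplicate keys).
def Pre_assign_director_weight (media_weights : List (Int × Int)) (discovered_data : List (List (String × Int))) (directors : List (Int × Int)) : Prop :=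
  (media_weights.map Prod.fst).Nodup ∧
  ∀ movie ∈ discovered_data, (PySem.Dict.mk movie).contains "director" = true →
    ((PySem.Dict.mk movie).contains "id" = true ∧
     ∀ p ∈ directors, p.1 = (PySem.Dict.mk movie).getD "director" 0 →
       (PySem.Dict.mk media_weights).contains ((PySem.Dict.mk movie).getD "id" 0) = true)
instance (media_weights : List (Int × Int)) (discovered_data : List (List (String × Int))) (directors : List (Int × Int)) : Decidable (Pre_assign_director_weight media_weights discovered_data directors) := by unfold Pre_assign_director_weight; infer_instance

def pvWitness_assign_director_weight : (List (Int × Int)) × (List (List (String × Int))) × (List (Int × Int)) :=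
  ([(1, 10), (2, 0)], [[("director", 5), ("id", 1)], [("id", 2)]], [(5, 3), (4, 7)])

def Spec_assign_director_weight (media_weights : List (Int × Int)) (discovered_data : List (List (String × Int))) (directors : List (Int × Int)) (out : List (Int × Int)) : Prop := out = assign_director_weight_alt media_weights discovered_data directors
instance (media_weights : List (Int × Int)) (discovered_data : List (List (String × Int))) (directors : List (Int × Int)) (out : List (Int × Int)) : Decidable (Spec_assign_director_weight media_weights discovered_data directors out) := by unfold Spec_assign_director_weight; infer_instance

-- ===== CLAIM (what is proved, stated in full; the proofs are below) =====
def Claim_equal_assign_director_weight : Prop := ∀ (media_weights : List (Int × Int)) (discovered_data : List (List (String × Int))) (directors : List (Int × Int)), Dom_assign_director_weight media_weights discovered_data directors → Pre_assign_director_weight media_weights discovered_data directors → Spec_assign_director_weight media_weights discovered_data directors (assign_director_weight media_weights discovered_data directors)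

-- ===== LEMMAS AND PROOFS =====

-- one additive update, the common step of both loops
def pvStep (d : PySem.Dict Int Int) (o : Int × Int) : PySem.Dict Int Int := d.modify o.1 0 (· + o.2)
def pvApply (d : PySem.Dict Int Int) (ops : List (Int × Int)) : PySem.Dict Int Int := ops.foldl pvStep d
def pvKeySum (ops : List (Int × Int)) (k : Int) : Int := ((ops.filter (fun o => o.1 == k)).map (·.2)).sum
def pvPairs (discovered_data : List (List (String × Int))) : List (Int × Int) :=
  discovered_data.filterMap (fun movie =>
    let m : PySem.Dict String Int := PySem.Dict.mk movie
    if m.contains "director" then some (m.getD "director" 0, m.getD "id" 0) else none)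

theorem pvKeySum_nil (k : Int) : pvKeySum [] k = 0 := rfl

theorem pvKeySum_cons (o : Int × Int) (ops : List (Int × Int)) (k : Int) :
    pvKeySum (o :: ops) k = (if o.1 == k then o.2 else 0) + pvKeySum ops k := by
  unfold pvKeySum
  by_cases h : o.1 == k <;> simp [h]

theorem pvKeySum_append (xs ys : List (Int × Int)) (k : Int) :
    pvKeySum (xs ++ ys) k = pvKeySum xs k + pvKeySum ys k := by
  unfold pvKeySum; simp

theorem pvApply_items (ops : List (Int × Int)) (d : PySem.Dict Int Int)
    (hc : ∀ o ∈ ops, d.contains o.1 = true) (hnd : d.keys.Nodup) :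
    (pvApply d ops).items = d.items.map (fun q => (q.1, q.2 + pvKeySum ops q.1)) := by
  induction ops generalizing d with
  | nil => simp [pvApply, pvKeySum_nil]
  | cons o ops ih =>
    have hco : d.contains o.1 = true := hc o (by simp)
    have hstep : pvApply d (o :: ops) = pvApply (pvStep d o) ops := rfl
    have hc' : ∀ o' ∈ ops, (pvStep d o).contains o'.1 = true := by
      intro o' ho'
      simp [pvStep, PySem.Dict.contains_modify, hc o' (by simp [ho'])]
    have hkeys : (pvStep d o).keys = d.keys := by
      simp [pvStep, PySem.Dict.modify, PySem.Dict.keys_insert_of_contains _ _ hco]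
    have hnd' : (pvStep d o).keys.Nodup := by rw [hkeys]; exact hnd
    have hitems : (pvStep d o).items
        = d.items.map (fun q => if q.1 == o.1 then (o.1, d.getD o.1 0 + o.2) else q) := by
      simp [pvStep, PySem.Dict.modify, PySem.Dict.items_insert_of_contains _ _ hco]
    rw [hstep, ih _ hc' hnd', hitems, List.map_map]
    apply List.map_congr_left
    intro q hq
    by_cases h : q.1 = o.1
    · have hget : d.getD o.1 0 = q.2 := by rw [← h]; exact PySem.Dict.getD_of_mem_items d hq hnd 0
      simp [Function.comp, h, pvKeySum_cons, hget]
      ring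
    · simp [Function.comp, h, pvKeySum_cons, Ne.symm h]

theorem pvSum_swap (l m : List (Int × Int)) (f : Int × Int → Int × Int → Int) :
    (l.map (fun a => (m.map (f a)).sum)).sum = (m.map (fun b => (l.map (fun a => f a b)).sum)).sum := by
  induction l with
  | nil => simp
  | cons a l ih =>
    simp only [List.map_cons, List.sum_cons, ih]
    rw [← PySem.List.sum_map_add_int]

def pvOpsA (directors : List (Int × Int)) (discovered_data : List (List (String × Int))) : List (Int × Int) :=
  (pvPairs discovered_data).flatMap (fun pr =>
    (directors.filter (fun p => pr.1 == p.1)).map (fun p => (pr.2, p.2)))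

def pvOpsB (directors : List (Int × Int)) (discovered_data : List (List (String × Int))) : List (Int × Int) :=
  directors.flatMap (fun p =>
    ((pvPairs discovered_data).filter (fun pr => pr.1 == p.1)).map (fun pr => (pr.2, p.2)))

theorem pvApply_append (xs ys : List (Int × Int)) (d : PySem.Dict Int Int) :
    pvApply d (xs ++ ys) = pvApply (pvApply d xs) ys := List.foldl_append ..

theorem pvA_inner (directors : List (Int × Int)) (did mid : Int) (d : PySem.Dict Int Int) :
    directors.foldl (fun d2 p => if did == p.1 then d2.modify mid 0 (· + p.2) else d2) d
      = pvApply d ((directors.filter (fun p => did == p.1)).map (fun p => (mid, p.2))) := by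
  induction directors generalizing d with
  | nil => rfl
  | cons p dirs ih =>
    by_cases h : (did == p.1) = true
    · rw [List.foldl_cons, if_pos h, ih]
      simp only [List.filter_cons, h, if_true, List.map_cons, pvApply, List.foldl_cons, pvStep]
    · rw [List.foldl_cons, if_neg (by simp [h]), ih]
      simp only [List.filter_cons, h, Bool.false_eq_true, if_false]

theorem pvA_foldl (directors : List (Int × Int)) (discovered_data : List (List (String × Int))) (d : PySem.Dict Int Int) :
    discovered_data.foldl (fun d movie =>
        if (PySem.Dict.mk movie).contains "director" = true then
          pvApply d ((directors.filter (fun p => (PySem.Dict.mk movie).getD "director" 0 == p.1)).map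
            (fun p => ((PySem.Dict.mk movie).getD "id" 0, p.2)))
        else d) d
      = pvApply d (pvOpsA directors discovered_data) := by
  induction discovered_data generalizing d with
  | nil => rfl
  | cons movie dd ih =>
    by_cases hm : (PySem.Dict.mk movie).contains "director" = true
    · have hpairs : pvPairs (movie :: dd)
          = ((PySem.Dict.mk movie).getD "director" 0, (PySem.Dict.mk movie).getD "id" 0) :: pvPairs dd :=
        List.filterMap_cons_some (if_pos hm)
      rw [List.foldl_cons, if_pos hm, ih]
      simp only [pvOpsA]
      rw [hpairs, List.flatMap_cons, pvApply_append]
    · have hpairs : pvPairs (movie :: dd) = pvPairs dd :=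
        List.filterMap_cons_none (if_neg hm)
      rw [List.foldl_cons, if_neg hm, ih]
      simp only [pvOpsA]
      rw [hpairs]

theorem pvA_eq_apply (media_weights : List (Int × Int)) (discovered_data : List (List (String × Int))) (directors : List (Int × Int)) :
    assign_director_weight media_weights discovered_data directors
      = (pvApply (PySem.Dict.mk media_weights) (pvOpsA directors discovered_data)).items := by
  unfold assign_director_weight
  congr 1
  rw [List.foldl_ext _
    (fun d movie =>
      if (PySem.Dict.mk movie).contains "director" = true then
        pvApply d ((directors.filter (fun p => (PySem.Dict.mk movie).getD "director" 0 == p.1)).map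
          (fun p => ((PySem.Dict.mk movie).getD "id" 0, p.2)))
      else d) _
    (fun d movie _ => by
      show (if (PySem.Dict.mk movie).contains "director" = true then
              directors.foldl (fun d2 p =>
                if (PySem.Dict.mk movie).getD "director" 0 == p.1 then
                  d2.modify ((PySem.Dict.mk movie).getD "id" 0) 0 (· + p.2)
                else d2) d
            else d)
          = (if (PySem.Dict.mk movie).contains "director" = true then
              pvApply d ((directors.filter (fun p => (PySem.Dict.mk movie).getD "director" 0 == p.1)).map
                (fun p => ((PySem.Dict.mk movie).getD "id" 0, p.2)))
            else d)
      by_cases hm : (PySem.Dict.mk movie).contains "director" = true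
      · rw [if_pos hm, if_pos hm]
        exact pvA_inner directors _ _ d
      · rw [if_neg hm, if_neg hm])]
  exact pvA_foldl directors discovered_data (PySem.Dict.mk media_weights)

theorem pvB_inner (bucket : List Int) (w : Int) (d : PySem.Dict Int Int) :
    bucket.foldl (fun d2 mid => d2.modify mid 0 (· + w)) d
      = pvApply d (bucket.map (fun mid => (mid, w))) := by
  induction bucket generalizing d with
  | nil => rfl
  | cons mid bucket ih => rw [List.foldl_cons, List.map_cons, ih]; rfl

theorem pvB_foldl (dirs : List (Int × Int)) (pairsL : List (Int × Int)) (d : PySem.Dict Int Int) :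
    dirs.foldl (fun d p =>
        ((pairsL.foldl (fun ix pr => ix.modify pr.1 [] (· ++ [pr.2])) PySem.Dict.empty).getD p.1 []).foldl
          (fun d2 movie_id => d2.modify movie_id 0 (· + p.2)) d) d
      = pvApply d (dirs.flatMap (fun p => (pairsL.filter (fun pr => pr.1 == p.1)).map (fun pr => (pr.2, p.2)))) := by
  induction dirs generalizing d with
  | nil => rfl
  | cons p dirs ih =>
    rw [List.foldl_cons, ih, List.flatMap_cons, pvApply_append]
    congr 1
    rw [PySem.Dict.getD_foldl_modify_append, PySem.Dict.getD_empty, List.nil_append, pvB_inner,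
      List.map_map]
    rfl

theorem pvB_eq_apply (media_weights : List (Int × Int)) (discovered_data : List (List (String × Int))) (directors : List (Int × Int)) :
    assign_director_weight_alt media_weights discovered_data directors
      = (pvApply (PySem.Dict.mk media_weights) (pvOpsB directors discovered_data)).items := by
  unfold assign_director_weight_alt pvOpsB
  exact congrArg PySem.Dict.items (pvB_foldl directors (pvPairs discovered_data) (PySem.Dict.mk media_weights))

theorem pvKeySum_flatMap {α : Type} (l : List α) (f : α → List (Int × Int)) (k : Int) :
    pvKeySum (l.flatMap f) k = (l.map (fun x => pvKeySum (f x) k)).sum := by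
  induction l with
  | nil => rfl
  | cons a l ih => rw [List.flatMap_cons, pvKeySum_append, List.map_cons, List.sum_cons, ih]

theorem pvKeySum_constKey (l : List (Int × Int)) (c : Int × Int → Bool) (mid k : Int) :
    pvKeySum ((l.filter c).map (fun p => (mid, p.2))) k
      = (l.map (fun p => if c p && (mid == k) then p.2 else 0)).sum := by
  induction l with
  | nil => rfl
  | cons p l ih =>
    by_cases h : c p = true
    · rw [List.filter_cons_of_pos h, List.map_cons, pvKeySum_cons, ih]
      by_cases hk : mid = k <;> simp [h, hk]
    · rw [List.filter_cons_of_neg (by simp [h]), ih]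
      simp [h]

theorem pvKeySum_constW (l : List (Int × Int)) (c : Int × Int → Bool) (w k : Int) :
    pvKeySum ((l.filter c).map (fun pr => (pr.2, w))) k
      = (l.map (fun pr => if c pr && (pr.2 == k) then w else 0)).sum := by
  induction l with
  | nil => rfl
  | cons pr l ih =>
    by_cases h : c pr = true
    · rw [List.filter_cons_of_pos h, List.map_cons, pvKeySum_cons, ih]
      by_cases hk : pr.2 = k <;> simp [h, hk]
    · rw [List.filter_cons_of_neg (by simp [h]), ih]
      simp [h]

theorem pvKeySum_A_eq_B (directors : List (Int × Int)) (discovered_data : List (List (String × Int))) (k : Int) :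
    pvKeySum (pvOpsA directors discovered_data) k = pvKeySum (pvOpsB directors discovered_data) k := by
  rw [pvOpsA, pvOpsB, pvKeySum_flatMap, pvKeySum_flatMap]
  have hA : ∀ pr : Int × Int,
      pvKeySum ((directors.filter (fun p => pr.1 == p.1)).map (fun p => (pr.2, p.2))) k
        = (directors.map (fun p => if (pr.1 == p.1) && (pr.2 == k) then p.2 else 0)).sum := by
    intro pr
    rw [pvKeySum_constKey]
  have hB : ∀ p : Int × Int,
      pvKeySum (((pvPairs discovered_data).filter (fun pr => pr.1 == p.1)).map (fun pr => (pr.2, p.2))) k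
        = ((pvPairs discovered_data).map (fun pr => if (pr.1 == p.1) && (pr.2 == k) then p.2 else 0)).sum := by
    intro p
    rw [pvKeySum_constW]
  simp only [hA, hB]
  exact pvSum_swap (pvPairs discovered_data) directors
    (fun pr p => if (pr.1 == p.1) && (pr.2 == k) then p.2 else 0)

theorem pvKey_contained (media_weights : List (Int × Int)) (discovered_data : List (List (String × Int))) (directors : List (Int × Int))
    (hpre : Pre_assign_director_weight media_weights discovered_data directors) :
    ∀ pr ∈ pvPairs discovered_data, ∀ p ∈ directors, (pr.1 == p.1) = true →
      (PySem.Dict.mk media_weights).contains pr.2 = true := by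
  intro pr hpr p hp heq
  obtain ⟨movie, hmov, hf⟩ := List.mem_filterMap.mp hpr
  by_cases hm : (PySem.Dict.mk movie).contains "director" = true
  · simp only [hm, if_true] at hf
    obtain ⟨-, h2⟩ := hpre.2 movie hmov hm
    have hpr1 : pr.1 = (PySem.Dict.mk movie).getD "director" 0 := by
      rw [← Option.some.injEq _ _ |>.mpr rfl] at hf
      cases hf; rfl
    have := h2 p hp (by rw [← hpr1]; exact (beq_iff_eq.mp heq).symm)
    have hpr2 : pr.2 = (PySem.Dict.mk movie).getD "id" 0 := by cases hf; rfl
    rw [hpr2]; exact this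
  · simp [hm] at hf

-- ===== VERDICT (by name: the statement is the Claim_ definition above) =====
theorem assign_director_weight_spec : Claim_equal_assign_director_weight := by
  intro media_weights discovered_data directors _ hpre
  unfold Spec_assign_director_weight
  rw [pvA_eq_apply, pvB_eq_apply]
  have hkey := pvKey_contained media_weights discovered_data directors hpre
  have hnd : (PySem.Dict.mk media_weights).keys.Nodup := by
    simpa [PySem.Dict.keys_mk] using hpre.1
  have hcA : ∀ o ∈ pvOpsA directors discovered_data, (PySem.Dict.mk media_weights).contains o.1 = true := by
    intro o ho
    obtain ⟨pr, hpr, hmem⟩ := List.mem_flatMap.mp ho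
    obtain ⟨p, hpf, hpeq⟩ := List.mem_map.mp hmem
    obtain ⟨hp, hmatch⟩ := List.mem_filter.mp hpf
    rw [← hpeq]
    exact hkey pr hpr p hp hmatch
  have hcB : ∀ o ∈ pvOpsB directors discovered_data, (PySem.Dict.mk media_weights).contains o.1 = true := by
    intro o ho
    obtain ⟨p, hp, hmem⟩ := List.mem_flatMap.mp ho
    obtain ⟨pr, hprf, hpeq⟩ := List.mem_map.mp hmem
    obtain ⟨hpr, hmatch⟩ := List.mem_filter.mp hprf
    rw [← hpeq]
    exact hkey pr hpr p hp hmatch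
  rw [pvApply_items _ _ hcA hnd, pvApply_items _ _ hcB hnd]
  apply List.map_congr_left
  intro q hq
  rw [pvKeySum_A_eq_B]
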